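-- pv_equiv track=rewrite | github.com/Whiplashzeb/relation_extration | inner_sentence.py | distance_and_order_cal
-- ===== SOURCE A (Python) =====
-- def distance_and_order_cal(sentence, chemical, disease):
--     c_pos = 0
--     d_pos = 0
--     sentence = sentence.split()
--     l = len(sentence)
--     for i in range(l):
--         if chemical in sentence[i]:
--             c_pos = i
--         if disease in sentence[i]:
--             d_pos = i
--     if c_pos > d_pos:
--         order = 1
--     else:
--         order = 0
--     result = [c_pos, d_pos, abs(c_pos - d_pos), l, order]
--
--     return result
-- ===== SOURCE B (Python) =====
-- def distance_and_order_cal(sentence, chemical, disease):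
--     tokens = sentence.split()
--     l = len(tokens)
--
--     def last_pos(entity):
--         for i in range(l - 1, -1, -1):
--             if entity in tokens[i]:
--                 return i
--         return 0
--
--     c_pos = last_pos(chemical)
--     d_pos = last_pos(disease)
--     return [c_pos, d_pos, abs(c_pos - d_pos), l, 1 if c_pos > d_pos else 0]
-- ===== Notes on version B (the rewrite author's own statement) =====
-- stated objective: alternative
-- what changed: A makes one exhaustive forward sweep updating both positions on every match; B runs two independent backward searches that each return at the first match (the last occurrence), defaulting to 0.
import Mathlib
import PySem

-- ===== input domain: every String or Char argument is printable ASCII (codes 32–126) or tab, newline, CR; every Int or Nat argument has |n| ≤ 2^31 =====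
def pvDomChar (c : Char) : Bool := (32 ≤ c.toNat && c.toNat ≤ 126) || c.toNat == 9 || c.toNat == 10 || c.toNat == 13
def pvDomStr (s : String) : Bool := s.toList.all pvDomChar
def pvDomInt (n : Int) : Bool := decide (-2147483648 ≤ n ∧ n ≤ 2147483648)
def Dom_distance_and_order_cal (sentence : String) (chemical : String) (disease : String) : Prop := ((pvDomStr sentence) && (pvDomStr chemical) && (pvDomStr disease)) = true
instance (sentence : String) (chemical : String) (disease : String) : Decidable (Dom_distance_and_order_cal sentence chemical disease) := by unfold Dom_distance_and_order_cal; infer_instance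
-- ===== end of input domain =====

-- B replaces A's single exhaustive forward sweep (which overwrites both positions on every match)
-- by two independent backward searches that stop at the first (= last-occurring) match; objective: alternative.

-- ===== PORT A =====
def distance_and_order_cal (sentence : String) (chemical : String) (disease : String) : List Int :=
  let toks := PySem.Str.split₀ sentence
  let l : Int := toks.length
  let cd := (PySem.List.enumerate toks 0).foldl
    (fun (cd : Int × Int) p =>
      (if PySem.Str.isIn chemical p.2 then p.1 else cd.1,
       if PySem.Str.isIn disease p.2 then p.1 else cd.2)) (0, 0)
  let order : Int := if cd.1 > cd.2 then 1 else 0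
  [cd.1, cd.2, |cd.1 - cd.2|, l, order]

-- ===== PORT B =====
-- last_pos: walk the tokens from the end (indices l-1 .. 0), return at the first hit, else 0
def pvLastPos (revToks : List (Int × String)) (entity : String) : Int :=
  match revToks with
  | [] => 0
  | p :: rest => if PySem.Str.isIn entity p.2 then p.1 else pvLastPos rest entity

def distance_and_order_cal_alt (sentence : String) (chemical : String) (disease : String) : List Int :=
  let toks := PySem.Str.split₀ sentence
  let l : Int := toks.length
  let rev := (PySem.List.enumerate toks 0).reverse
  let c_pos := pvLastPos rev chemical
  let d_pos := pvLastPos rev disease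
  [c_pos, d_pos, |c_pos - d_pos|, l, if c_pos > d_pos then 1 else 0]

-- ===== PRECONDITION & SPEC =====
def Spec_distance_and_order_cal (sentence : String) (chemical : String) (disease : String) (out : List Int) : Prop := out = distance_and_order_cal_alt sentence chemical disease
instance (sentence : String) (chemical : String) (disease : String) (out : List Int) : Decidable (Spec_distance_and_order_cal sentence chemical disease out) := by unfold Spec_distance_and_order_cal; infer_instance

-- ===== CLAIM (what is proved, stated in full; the proofs are below) =====
def Claim_equal_distance_and_order_cal : Prop := ∀ (sentence : String) (chemical : String) (disease : String), Dom_distance_and_order_cal sentence chemical disease → Spec_distance_and_order_cal sentence chemical disease (distance_and_order_cal sentence chemical disease)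

-- ===== LEMMAS AND PROOFS =====

-- the paired fold splits into two independent folds
theorem pv_pairFold (xs : List (Int × String)) (P Q : String → Bool) (a b : Int) :
    xs.foldl (fun (cd : Int × Int) p =>
      (if P p.2 then p.1 else cd.1, if Q p.2 then p.1 else cd.2)) (a, b)
    = (xs.foldl (fun acc p => if P p.2 then p.1 else acc) a,
       xs.foldl (fun acc p => if Q p.2 then p.1 else acc) b) := by
  induction xs generalizing a b with
  | nil => rfl
  | cons x t ih => simp [List.foldl, ih]

-- a "keep the last hit" fold equals the first hit of the reversed list
theorem pv_foldl_last (xs : List (Int × String)) (P : String → Bool) (a : Int) :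
    xs.foldl (fun acc p => if P p.2 then p.1 else acc) a
    = (match xs.reverse.find? (fun p => P p.2) with
       | some p => p.1
       | none => a) := by
  induction xs generalizing a with
  | nil => rfl
  | cons x t ih =>
    simp only [List.foldl, List.reverse_cons, List.find?_append, ih]
    cases h : t.reverse.find? (fun p => P p.2) with
    | some p => simp
    | none =>
      simp only [Option.none_or]
      by_cases hx : P x.2 <;> simp [List.find?, hx]

-- pvLastPos is exactly find?-with-default-0
theorem pv_lastPos_eq (ys : List (Int × String)) (e : String) :
    pvLastPos ys e
    = (match ys.find? (fun p => PySem.Str.isIn e p.2) with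
       | some p => p.1
       | none => 0) := by
  induction ys with
  | nil => rfl
  | cons y t ih =>
    simp only [pvLastPos, List.find?]
    cases h : PySem.Str.isIn e y.2 <;> simp_all [PySem.Str.isIn]

-- ===== VERDICT (by name: the statement is the Claim_ definition above) =====
theorem distance_and_order_cal_spec : Claim_equal_distance_and_order_cal := by
  intro sentence chemical disease _
  unfold Spec_distance_and_order_cal distance_and_order_cal distance_and_order_cal_alt
  simp only [pv_pairFold, pv_foldl_last, pv_lastPos_eq]
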